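-- pv_equiv track=rewrite | github.com/dandavison/misc-python | hired_maze.py | solution
-- ===== SOURCE A (Python) =====
-- def solution(maze, n):
--     if maze[0][0] != 0:
--         return False
--     has_path = {(0, 0)}
--     for level in range(1, 2 * n):
--         for i, j in get_diagonal_coords(level, n):
--             # This condition looks inelegant
--             if i < n and j < n and maze[i][j] != 0:
--                 continue
--             for k, l in get_neighbors(i, j):
--                 if (k, l) in has_path:
--                     has_path.add((i, j))
--                     break
--
--     return (n - 1, n - 1) in has_path
--
-- def get_neighbors(i, j):
--     if i > 0:
--         yield (i - 1, j)
--     if j > 0: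
--         yield (i, j - 1)
--
-- def get_diagonal_coords(level, n):
--     if level < n:
--         i, j = (level, 0)
--     else:
--         i, j = (n - 1, level - n + 1)
--     while i >= 0:
--         yield (i, j)
--         i -= 1
--         j += 1
-- ===== SOURCE B (Python) =====
-- def solution(maze, n):
--     if maze[0][0] != 0:
--         return False
--     visited = {(0, 0)}
--     stack = [(0, 0)]
--     while stack:
--         i, j = stack.pop()
--         if (i, j) == (n - 1, n - 1):
--             return True
--         for k, l in ((i + 1, j), (i, j + 1)):
--             if k < n and l < n and (k, l) not in visited and maze[k][l] == 0:
--                 visited.add((k, l))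
--                 stack.append((k, l))
--     return False
-- ===== Notes on version B (the rewrite author's own statement) =====
-- stated objective: alternative
-- what changed: Replaced the exhaustive anti-diagonal dynamic-programming sweep over every grid cell (including out-of-grid diagonal coordinates) with a depth-first frontier search from (0,0) using an explicit stack and visited set that explores only reachable cells and stops as soon as the target corner is popped.
import Mathlib
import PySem

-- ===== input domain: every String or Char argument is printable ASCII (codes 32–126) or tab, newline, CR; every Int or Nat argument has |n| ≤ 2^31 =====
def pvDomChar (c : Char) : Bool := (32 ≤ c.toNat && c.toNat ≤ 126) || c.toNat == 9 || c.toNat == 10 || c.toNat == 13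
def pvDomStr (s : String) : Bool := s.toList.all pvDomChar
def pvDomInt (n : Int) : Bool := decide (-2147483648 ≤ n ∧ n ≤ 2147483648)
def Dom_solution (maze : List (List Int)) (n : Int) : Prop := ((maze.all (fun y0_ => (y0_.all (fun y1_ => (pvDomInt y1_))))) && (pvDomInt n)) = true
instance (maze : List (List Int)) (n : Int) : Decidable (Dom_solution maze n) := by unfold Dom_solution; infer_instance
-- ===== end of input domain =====

-- B replaces A's exhaustive anti-diagonal sweep over every grid cell by a depth-first
-- search from (0,0) with an explicit stack and visited set, exploring only reachable
-- cells and returning as soon as the target corner is popped (alternative algorithm).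

-- ===== PORT A =====
-- maze[i][j]; total form (missing cells read as a wall), only reached in range under Pre_
def mazeAt (maze : List (List Int)) (i j : Int) : Int :=
  ((PySem.List.pyGet? maze i).bind (fun row => PySem.List.pyGet? row j)).getD 1

-- the 'while i >= 0: yield (i, j); i -= 1; j += 1' loop of get_diagonal_coords
def diagFrom (i j : Int) : List (Int × Int) :=
  if h : 0 ≤ i then (i, j) :: diagFrom (i - 1) (j + 1) else []
termination_by (i + 1).toNat
decreasing_by omega

def getDiagonalCoords (level n : Int) : List (Int × Int) :=
  if level < n then diagFrom level 0 else diagFrom (n - 1) (level - n + 1)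

def getNeighbors (i j : Int) : List (Int × Int) :=
  (if 0 < i then [(i - 1, j)] else []) ++ (if 0 < j then [(i, j - 1)] else [])

-- the body of the inner 'for i, j in get_diagonal_coords(...)' loop
def stepCell (maze : List (List Int)) (n : Int) (hp : PySem.Set (Int × Int))
    (ij : Int × Int) : PySem.Set (Int × Int) :=
  if ij.1 < n ∧ ij.2 < n ∧ mazeAt maze ij.1 ij.2 ≠ 0 then hp
  else if (getNeighbors ij.1 ij.2).any (fun p => PySem.Set.contains hp p)
  then PySem.Set.add hp ij else hp

-- the body of the outer 'for level in range(1, 2 * n)' loop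
def stepLevel (maze : List (List Int)) (n : Int) (hp : PySem.Set (Int × Int))
    (level : Int) : PySem.Set (Int × Int) :=
  (getDiagonalCoords level n).foldl (stepCell maze n) hp

def solution (maze : List (List Int)) (n : Int) : Bool :=
  if mazeAt maze 0 0 ≠ 0 then false
  else
    PySem.Set.contains
      ((PySem.List.pyRange 1 (2 * n) 1).foldl (stepLevel maze n)
        (PySem.Set.ofList [((0 : Int), (0 : Int))]))
      (n - 1, n - 1)

-- ===== PORT B =====
-- the body of B's inner 'for k, l in ((i+1,j),(i,j+1))' loop: conditionally mark and push
def tryPush (maze : List (List Int)) (n : Int)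
    (st : PySem.Set (Int × Int) × List (Int × Int)) (kl : Int × Int) :
    PySem.Set (Int × Int) × List (Int × Int) :=
  if kl.1 < n ∧ kl.2 < n ∧ ¬ kl ∈ st.1 ∧ mazeAt maze kl.1 kl.2 = 0
  then (PySem.Set.add st.1 kl, kl :: st.2)
  else st

-- B's 'while stack:' loop; fuel only makes the recursion structural (it is proven
-- sufficient: every iteration pops one entry and every push adds a fresh in-grid cell)
def dfs (maze : List (List Int)) (n : Int) :
    Nat → PySem.Set (Int × Int) → List (Int × Int) → Bool
  | 0, _, _ => false
  | fuel + 1, visited, stack =>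
    match stack with
    | [] => false
    | ij :: rest =>
      if ij = (n - 1, n - 1) then true
      else
        let st := [(ij.1 + 1, ij.2), (ij.1, ij.2 + 1)].foldl (tryPush maze n) (visited, rest)
        dfs maze n fuel st.1 st.2

def solution_alt (maze : List (List Int)) (n : Int) : Bool :=
  if mazeAt maze 0 0 ≠ 0 then false
  else
    dfs maze n (2 * (n * n).toNat + 1)
      (PySem.Set.ofList [((0 : Int), (0 : Int))]) [((0 : Int), (0 : Int))]

-- ===== PRECONDITION & SPEC =====
-- Pre_ excludes exactly the inputs on which A raises IndexError: a maze with no first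
-- cell, or (when that cell is 0 and n ≥ 1) a maze whose top-left n×n block is incomplete.
def Pre_solution (maze : List (List Int)) (n : Int) : Prop :=
  (maze.head?.getD []) ≠ [] ∧
  (mazeAt maze 0 0 ≠ 0 ∨ n ≤ 0 ∨
    (1 ≤ n ∧ n ≤ (maze.length : Int) ∧ ∀ row ∈ maze.take n.toNat, n ≤ (row.length : Int)))
instance (maze : List (List Int)) (n : Int) : Decidable (Pre_solution maze n) := by
  unfold Pre_solution; infer_instance

def pvWitness_solution : List (List Int) × Int := ([[0, 0], [1, 0]], 2)

def Spec_solution (maze : List (List Int)) (n : Int) (out : Bool) : Prop := out = solution_alt maze n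
instance (maze : List (List Int)) (n : Int) (out : Bool) : Decidable (Spec_solution maze n out) := by unfold Spec_solution; infer_instance

-- ===== CLAIM (what is proved, stated in full; the proofs are below) =====
def Claim_equal_solution : Prop := ∀ (maze : List (List Int)) (n : Int), Dom_solution maze n → Pre_solution maze n → Spec_solution maze n (solution maze n)

-- ===== LEMMAS AND PROOFS =====

-- reachability spec: R maze i j = cell (i,j) is reachable from (0,0) via down/right
-- moves through 0-cells ((0,0) counted reachable unconditionally, as A's initial set)
def R (maze : List (List Int)) : Nat → Nat → Bool
  | 0, 0 => true
  | i + 1, 0 => (mazeAt maze (↑(i + 1)) 0 == 0) && R maze i 0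
  | 0, j + 1 => (mazeAt maze 0 (↑(j + 1)) == 0) && R maze 0 j
  | i + 1, j + 1 => (mazeAt maze (↑(i + 1)) (↑(j + 1)) == 0) &&
      (R maze i (j + 1) || R maze (i + 1) j)
termination_by i j => i + j

theorem R_wall {maze : List (List Int)} (h0 : mazeAt maze 0 0 = 0) (a b : Nat)
    (hw : mazeAt maze (↑a) (↑b) ≠ 0) : R maze a b = false := by
  match a, b with
  | 0, 0 => exact absurd h0 (by simpa using hw)
  | a + 1, 0 => push_cast at hw; simp [R, hw]
  | 0, b + 1 => push_cast at hw; simp [R, hw]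
  | a + 1, b + 1 => push_cast at hw; simp [R, hw]

theorem R_step {maze : List (List Int)} (a b : Nat) (hab : ¬(a = 0 ∧ b = 0))
    (hopen : mazeAt maze (↑a) (↑b) = 0) :
    R maze a b = ((decide (0 < a) && R maze (a - 1) b) || (decide (0 < b) && R maze a (b - 1))) := by
  match a, b with
  | 0, 0 => exact absurd ⟨rfl, rfl⟩ hab
  | a + 1, 0 => push_cast at hopen; simp [R, hopen]
  | 0, b + 1 => push_cast at hopen; simp [R, hopen]
  | a + 1, b + 1 => push_cast at hopen; simp [R, hopen]

theorem mem_diagFrom (i j : Int) (p : Int × Int) :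
    p ∈ diagFrom i j ↔ 0 ≤ p.1 ∧ p.1 ≤ i ∧ p.1 + p.2 = i + j := by
  induction i, j using diagFrom.induct with
  | case1 i j h ih =>
    rw [diagFrom]
    simp only [dif_pos h, List.mem_cons, ih]
    constructor
    · rintro (rfl | ⟨h1, h2, h3⟩)
      · exact ⟨h, le_refl _, rfl⟩
      · exact ⟨h1, by omega, by omega⟩
    · rintro ⟨h1, h2, h3⟩
      by_cases hpi : p.1 = i
      · left
        obtain ⟨x, y⟩ := p
        simp only at h1 h2 h3 hpi
        subst hpi
        have : y = j := by omega
        rw [this]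
      · right
        exact ⟨h1, by omega, by omega⟩
  | case2 i j h =>
    rw [diagFrom]
    rw [dif_neg h]
    constructor
    · intro hmem
      exact absurd hmem (List.not_mem_nil)
    · intro hcon
      exfalso
      omega

theorem nodup_diagFrom (i j : Int) : (diagFrom i j).Nodup := by
  induction i, j using diagFrom.induct with
  | case1 i j h ih =>
    rw [diagFrom]
    simp only [dif_pos h, List.nodup_cons]
    refine ⟨fun hmem => ?_, ih⟩
    obtain ⟨-, h2, -⟩ := (mem_diagFrom _ _ _).mp hmem
    have h2' : i ≤ i - 1 := h2
    omega
  | case2 i j h =>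
    rw [diagFrom]
    simp [dif_neg h]

theorem nodup_getDiagonalCoords (level n : Int) : (getDiagonalCoords level n).Nodup := by
  unfold getDiagonalCoords
  split <;> exact nodup_diagFrom _ _

theorem bounds_getDiagonalCoords {level n : Int} :
    ∀ p ∈ getDiagonalCoords level n, 0 ≤ p.1 ∧ p.1 < n ∧ 0 ≤ p.2 ∧ p.1 + p.2 = level := by
  intro p hp
  unfold getDiagonalCoords at hp
  split at hp
  · have := (mem_diagFrom _ _ _).mp hp
    exact ⟨this.1, by omega, by omega, by omega⟩
  · have := (mem_diagFrom _ _ _).mp hp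
    exact ⟨this.1, by omega, by omega, by omega⟩

theorem complete_getDiagonalCoords {level n : Int} (i j : Nat)
    (hi : (↑i : Int) < n) (hsum : (↑i : Int) + ↑j = level) :
    ((↑i : Int), (↑j : Int)) ∈ getDiagonalCoords level n := by
  unfold getDiagonalCoords
  split
  · exact (mem_diagFrom _ _ _).mpr ⟨by omega, by omega, by omega⟩
  · exact (mem_diagFrom _ _ _).mpr ⟨by omega, by omega, by omega⟩

-- folding one anti-diagonal: exact membership for in-grid cells
theorem diagFold {maze : List (List Int)} {n : Int} (h0 : mazeAt maze 0 0 = 0)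
    (L : Nat) (hL : 1 ≤ L) :
    ∀ (cs : List (Int × Int)) (hp : PySem.Set (Int × Int)),
    cs.Nodup →
    (∀ p ∈ cs, 0 ≤ p.1 ∧ p.1 < n ∧ 0 ≤ p.2 ∧ p.1 + p.2 = ↑L) →
    (∀ i j : Nat, (↑i : Int) < n → (↑j : Int) < n →
      (((↑i : Int), (↑j : Int)) ∈ hp ↔
        ((i + j < L ∧ R maze i j = true) ∨
         (i + j = L ∧ R maze i j = true ∧ ((↑i : Int), (↑j : Int)) ∉ cs)))) →
    ∀ i j : Nat, (↑i : Int) < n → (↑j : Int) < n →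
      (((↑i : Int), (↑j : Int)) ∈ cs.foldl (stepCell maze n) hp ↔
        (i + j ≤ L ∧ R maze i j = true)) := by
  intro cs
  induction cs with
  | nil =>
    intro hp _ _ hstart i j hi hj
    rw [List.foldl_nil, hstart i j hi hj]
    constructor
    · rintro (⟨h1, h2⟩ | ⟨h1, h2, _⟩)
      · exact ⟨by omega, h2⟩
      · exact ⟨by omega, h2⟩
    · rintro ⟨h1, h2⟩
      by_cases hlt : i + j < L
      · exact Or.inl ⟨hlt, h2⟩
      · exact Or.inr ⟨by omega, h2, by simp⟩
  | cons c cs ih =>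
    intro hp hnd hbound hstart i j hi hj
    obtain ⟨hc1, hc2, hc3, hc4⟩ := hbound c (List.mem_cons_self ..)
    have hndtl := (List.nodup_cons.mp hnd).2
    have hcnotin := (List.nodup_cons.mp hnd).1
    rw [List.foldl_cons]
    refine ih (stepCell maze n hp c) hndtl
      (fun p hp' => hbound p (List.mem_cons_of_mem _ hp')) ?_ i j hi hj
    clear hi hj i j
    intro i j hi hj
    by_cases hbn : c.2 < n
    · -- c is an in-grid cell of diagonal L
      obtain ⟨c1, c2⟩ := c
      simp only at hc1 hc2 hc3 hc4 hbn hcnotin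
      obtain ⟨a, rfl⟩ : ∃ a : Nat, c1 = (↑a : Int) := ⟨c1.toNat, (Int.toNat_of_nonneg hc1).symm⟩
      obtain ⟨b, rfl⟩ : ∃ b : Nat, c2 = (↑b : Int) := ⟨c2.toNat, (Int.toNat_of_nonneg hc3).symm⟩
      have habL : a + b = L := by omega
      have hne00 : ¬(a = 0 ∧ b = 0) := by omega
      by_cases hw : mazeAt maze (↑a) (↑b) ≠ 0
      · -- wall: the cell is skipped and R is false there
        have hstep : stepCell maze n hp ((↑a : Int), (↑b : Int)) = hp := by
          unfold stepCell
          rw [if_pos ⟨hc2, hbn, hw⟩]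
        rw [hstep, hstart i j hi hj]
        have hR : R maze a b = false := R_wall h0 a b hw
        by_cases heq : (((↑i : Int), (↑j : Int)) : Int × Int) = ((↑a : Int), (↑b : Int))
        · have hij : i = a ∧ j = b := by
            simp only [Prod.mk.injEq, Nat.cast_inj] at heq; exact heq
          obtain ⟨rfl, rfl⟩ := hij
          simp [hR]
        · simp [List.mem_cons, heq]
      · rw [not_not] at hw
        -- open cell: the neighbour test computes exactly R
        have hco : ∀ (x y : Nat), (↑x : Int) < n → (↑y : Int) < n → x + y + 1 = L →
            PySem.Set.contains hp ((↑x : Int), (↑y : Int)) = R maze x y := by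
          intro x y hx hy hxy
          have hm : (((↑x : Int), (↑y : Int)) ∈ hp) ↔ R maze x y = true := by
            rw [hstart x y hx hy]
            constructor
            · rintro (⟨_, h2⟩ | ⟨h1, _, _⟩)
              · exact h2
              · omega
            · intro h; exact Or.inl ⟨by omega, h⟩
          exact Bool.eq_iff_iff.mpr ((PySem.Set.contains_iff hp _).trans hm)
        have hany : ((getNeighbors (↑a) (↑b)).any (fun p => PySem.Set.contains hp p)) = R maze a b := by
          rw [R_step a b hne00 hw]
          cases a with
          | zero =>
            cases b with
            | zero => exact absurd ⟨rfl, rfl⟩ hne00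
            | succ b' =>
              have e : ((↑(b' + 1) : Int)) - 1 = ↑b' := by omega
              have hb' : (↑b' : Int) < n := by push_cast at hbn ⊢; omega
              simp only [getNeighbors, Nat.cast_zero]
              rw [if_neg (by omega), if_pos (by exact_mod_cast Nat.succ_pos b')]
              simp only [List.nil_append, List.any_cons, List.any_nil, Bool.or_false, e]
              have hcv := hco 0 b' hc2 hb' (by omega)
              simp only [Nat.cast_zero] at hcv
              rw [hcv]
              simp
          | succ a' =>
            have ea : ((↑(a' + 1) : Int)) - 1 = ↑a' := by omega
            have ha' : (↑a' : Int) < n := by push_cast at hc2 ⊢; omega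
            cases b with
            | zero =>
              simp only [getNeighbors, Nat.cast_zero]
              rw [if_pos (by exact_mod_cast Nat.succ_pos a'), if_neg (by omega)]
              simp only [List.append_nil, List.any_cons, List.any_nil, Bool.or_false, ea]
              have hcv := hco a' 0 ha' hbn (by omega)
              simp only [Nat.cast_zero] at hcv
              rw [hcv]
              simp
            | succ b' =>
              have eb : ((↑(b' + 1) : Int)) - 1 = ↑b' := by omega
              have hb' : (↑b' : Int) < n := by push_cast at hbn ⊢; omega
              simp only [getNeighbors]
              rw [if_pos (by exact_mod_cast Nat.succ_pos a'), if_pos (by exact_mod_cast Nat.succ_pos b')]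
              simp only [List.cons_append, List.nil_append, List.any_cons, List.any_nil,
                Bool.or_false, ea, eb]
              rw [hco a' (b' + 1) ha' hbn (by omega), hco (a' + 1) b' hc2 hb' (by omega)]
              simp
        have hstep : stepCell maze n hp ((↑a : Int), (↑b : Int)) =
            if R maze a b then PySem.Set.add hp ((↑a : Int), (↑b : Int)) else hp := by
          unfold stepCell
          rw [if_neg (fun h => h.2.2 hw)]
          rw [show ((getNeighbors (↑a) (↑b)).any (fun p => PySem.Set.contains hp p)) = R maze a b from hany]
        rw [hstep]
        cases hR : R maze a b with
        | false =>
          simp only [Bool.false_eq_true, if_false]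
          rw [hstart i j hi hj]
          by_cases heq : (((↑i : Int), (↑j : Int)) : Int × Int) = ((↑a : Int), (↑b : Int))
          · have hij : i = a ∧ j = b := by
              simp only [Prod.mk.injEq, Nat.cast_inj] at heq; exact heq
            obtain ⟨rfl, rfl⟩ := hij
            simp [hR]
          · simp [List.mem_cons, heq]
        | true =>
          simp only [if_true]
          rw [PySem.Set.mem_add]
          by_cases heq : (((↑i : Int), (↑j : Int)) : Int × Int) = ((↑a : Int), (↑b : Int))
          · have hij : i = a ∧ j = b := by
              simp only [Prod.mk.injEq, Nat.cast_inj] at heq; exact heq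
            obtain ⟨rfl, rfl⟩ := hij
            constructor
            · intro _; exact Or.inr ⟨by omega, hR, hcnotin⟩
            · intro _; exact Or.inr rfl
          · rw [or_iff_left heq, hstart i j hi hj]
            simp [List.mem_cons, heq]
    · -- junk cell (second coordinate ≥ n): in-grid membership is unchanged
      have hne : (((↑i : Int), (↑j : Int)) : Int × Int) ≠ c := by
        intro h
        rw [← h] at hbn
        exact hbn hj
      have hmem : (((↑i : Int), (↑j : Int)) ∈ stepCell maze n hp c) ↔ ((↑i : Int), (↑j : Int)) ∈ hp := by
        unfold stepCell
        rw [if_neg (by rintro ⟨_, h2, _⟩; exact hbn h2)]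
        split
        · rw [PySem.Set.mem_add]
          simp [hne]
        · rfl
      rw [hmem, hstart i j hi hj]
      simp [List.mem_cons, hne]

-- processing one whole level advances the invariant by one
theorem stepLevel_inv {maze : List (List Int)} {n : Int} (h0 : mazeAt maze 0 0 = 0)
    (L : Nat) (hp : PySem.Set (Int × Int))
    (hinv : ∀ i j : Nat, (↑i : Int) < n → (↑j : Int) < n →
      (((↑i : Int), (↑j : Int)) ∈ hp ↔ (i + j ≤ L ∧ R maze i j = true))) :
    ∀ i j : Nat, (↑i : Int) < n → (↑j : Int) < n →
      (((↑i : Int), (↑j : Int)) ∈ stepLevel maze n hp (↑(L + 1)) ↔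
        (i + j ≤ L + 1 ∧ R maze i j = true)) := by
  unfold stepLevel
  refine diagFold h0 (L + 1) (by omega) _ hp (nodup_getDiagonalCoords _ _)
    bounds_getDiagonalCoords ?_
  intro i j hi hj
  rw [hinv i j hi hj]
  constructor
  · rintro ⟨h1, h2⟩
    exact Or.inl ⟨by omega, h2⟩
  · rintro (⟨h1, h2⟩ | ⟨h1, h2, h3⟩)
    · exact ⟨by omega, h2⟩
    · exact absurd (complete_getDiagonalCoords i j hi (by push_cast; omega)) h3

theorem levelsFold {maze : List (List Int)} {n : Int} (h0 : mazeAt maze 0 0 = 0) :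
    ∀ (k L : Nat) (hp : PySem.Set (Int × Int)),
    (∀ i j : Nat, (↑i : Int) < n → (↑j : Int) < n →
      (((↑i : Int), (↑j : Int)) ∈ hp ↔ (i + j ≤ L ∧ R maze i j = true))) →
    ∀ i j : Nat, (↑i : Int) < n → (↑j : Int) < n →
      (((↑i : Int), (↑j : Int)) ∈
          (PySem.List.pyRange (↑L + 1) (↑L + 1 + ↑k) 1).foldl (stepLevel maze n) hp ↔
        (i + j ≤ L + k ∧ R maze i j = true)) := by
  intro k
  induction k with
  | zero =>
    intro L hp hinv i j hi hj
    rw [show ((↑L : Int) + 1 + ↑(0 : Nat)) = ↑L + 1 by omega,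
      PySem.List.pyRange_one_eq_nil (le_refl _), List.foldl_nil]
    simpa using hinv i j hi hj
  | succ k ih =>
    intro L hp hinv i j hi hj
    have hsplit : PySem.List.pyRange (↑L + 1) (↑L + 1 + ↑(k + 1)) 1 =
        PySem.List.pyRange (↑L + 1) (↑L + 1 + ↑k) 1 ++ [((↑L : Int) + 1 + ↑k)] := by
      rw [show ((↑L : Int) + 1 + ↑(k + 1)) = (↑L + 1 + ↑k) + 1 by omega]
      exact PySem.List.pyRange_one_succ_right (by omega)
    rw [hsplit, List.foldl_append, List.foldl_cons, List.foldl_nil]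
    have hmid := ih L hp hinv
    rw [show ((↑L : Int) + 1 + ↑k) = ↑((L + k) + 1) by omega] at hmid ⊢
    rw [stepLevel_inv h0 (L + k) _ hmid i j hi hj]
    constructor
    · rintro ⟨h1, h2⟩; exact ⟨by omega, h2⟩
    · rintro ⟨h1, h2⟩; exact ⟨by omega, h2⟩

theorem solA_eq (maze : List (List Int)) (n : Int) (hn : 1 ≤ n)
    (h0 : mazeAt maze 0 0 = 0) :
    solution maze n = R maze (n.toNat - 1) (n.toNat - 1) := by
  unfold solution
  rw [if_neg (by simp [h0])]
  have hinv0 : ∀ i j : Nat, (↑i : Int) < n → (↑j : Int) < n →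
      (((↑i : Int), (↑j : Int)) ∈ (PySem.Set.ofList [((0 : Int), (0 : Int))]) ↔
        (i + j ≤ 0 ∧ R maze i j = true)) := by
    intro i j hi hj
    rw [show PySem.Set.ofList [((0 : Int), (0 : Int))] = [((0 : Int), (0 : Int))] from by decide]
    simp only [List.mem_singleton, Prod.mk.injEq, Nat.cast_eq_zero]
    constructor
    · rintro ⟨rfl, rfl⟩
      exact ⟨by omega, by simp [R]⟩
    · rintro ⟨h1, _⟩
      exact ⟨by omega, by omega⟩
  have hfold := levelsFold h0 (2 * n - 1).toNat 0 _ hinv0 (n.toNat - 1) (n.toNat - 1)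
    (by omega) (by omega)
  simp only [Nat.cast_zero, zero_add] at hfold
  rw [show (1 + ((2 * n - 1).toNat : Int)) = 2 * n by omega] at hfold
  rw [show ((n - 1 : Int), (n - 1 : Int)) =
      (((n.toNat - 1 : Nat) : Int), ((n.toNat - 1 : Nat) : Int)) from by
    rw [show (((n.toNat - 1 : Nat)) : Int) = n - 1 by omega]]
  refine Bool.eq_iff_iff.mpr ((PySem.Set.contains_iff _ _).trans (hfold.trans ?_))
  constructor
  · exact fun h => h.2
  · intro h; exact ⟨by omega, h⟩

-- ===== B-side lemmas: the DFS computes R at the target =====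

-- moving one step down/right through an open cell preserves reachability
theorem R_succ_down {maze : List (List Int)} (a b : Nat)
    (hopen : mazeAt maze (↑(a + 1)) (↑b) = 0) (h : R maze a b = true) :
    R maze (a + 1) b = true := by
  cases b with
  | zero =>
    have h' : mazeAt maze (↑a + 1) 0 = 0 := by push_cast at hopen; exact hopen
    simp [R, h', h]
  | succ b' =>
    have h' : mazeAt maze (↑a + 1) (↑b' + 1) = 0 := by push_cast at hopen; exact hopen
    simp [R, h', h]

theorem R_succ_right {maze : List (List Int)} (a b : Nat)
    (hopen : mazeAt maze (↑a) (↑(b + 1)) = 0) (h : R maze a b = true) :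
    R maze a (b + 1) = true := by
  cases a with
  | zero =>
    have h' : mazeAt maze 0 (↑b + 1) = 0 := by push_cast at hopen; exact hopen
    simp [R, h', h]
  | succ a' =>
    have h' : mazeAt maze (↑a' + 1) (↑b + 1) = 0 := by push_cast at hopen; exact hopen
    simp [R, h', h]

-- a nodup list of in-grid cells has at most n² elements
theorem length_le_grid {n : Int} (v : List (Int × Int)) (hnd : v.Nodup)
    (hg : ∀ p ∈ v, 0 ≤ p.1 ∧ p.1 < n ∧ 0 ≤ p.2 ∧ p.2 < n) :
    v.length ≤ n.toNat * n.toNat := by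
  calc v.length = v.toFinset.card := (List.toFinset_card_of_nodup hnd).symm
    _ ≤ ((Finset.range n.toNat ×ˢ Finset.range n.toNat).image
          (fun q : Nat × Nat => ((q.1 : Int), (q.2 : Int)))).card := by
        refine Finset.card_le_card ?_
        intro p hp
        rw [List.mem_toFinset] at hp
        obtain ⟨h1, h2, h3, h4⟩ := hg p hp
        refine Finset.mem_image.mpr ⟨(p.1.toNat, p.2.toNat), ?_, ?_⟩
        · rw [Finset.mem_product]
          constructor <;> rw [Finset.mem_range] <;> omega
        · obtain ⟨x, y⟩ := p
          simp only at h1 h2 h3 h4 ⊢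
          rw [Prod.mk.injEq]
          constructor <;> omega
    _ ≤ (Finset.range n.toNat ×ˢ Finset.range n.toNat).card := Finset.card_image_le
    _ = n.toNat * n.toNat := by rw [Finset.card_product, Finset.card_range]

-- the loop invariant of B's DFS
def InvB (maze : List (List Int)) (n : Int) (v s : List (Int × Int)) : Prop :=
  v.Nodup ∧
  (((0 : Int), (0 : Int)) ∈ v) ∧
  (∀ p ∈ s, p ∈ v) ∧
  (∀ p ∈ v, 0 ≤ p.1 ∧ p.1 < n ∧ 0 ≤ p.2 ∧ p.2 < n ∧ R maze p.1.toNat p.2.toNat = true) ∧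
  (∀ p ∈ v, p ∉ s → p ≠ (n - 1, n - 1) ∧
    ∀ q : Int × Int, (q = (p.1 + 1, p.2) ∨ q = (p.1, p.2 + 1)) →
      q.1 < n → q.2 < n → mazeAt maze q.1 q.2 = 0 → q ∈ v)

-- everything one tryPush guarantees, bundled
theorem tryPush_facts (maze : List (List Int)) (n : Int)
    (v s : List (Int × Int)) (kl : Int × Int) (hnd : v.Nodup) (hss : ∀ x ∈ s, x ∈ v) :
    (tryPush maze n (v, s) kl).1.Nodup ∧
    (∀ x ∈ v, x ∈ (tryPush maze n (v, s) kl).1) ∧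
    (∀ x ∈ (tryPush maze n (v, s) kl).1,
      x ∈ v ∨ (x = kl ∧ kl.1 < n ∧ kl.2 < n ∧ mazeAt maze kl.1 kl.2 = 0)) ∧
    (kl.1 < n → kl.2 < n → mazeAt maze kl.1 kl.2 = 0 → kl ∈ (tryPush maze n (v, s) kl).1) ∧
    (∀ x ∈ s, x ∈ (tryPush maze n (v, s) kl).2) ∧
    (∀ x ∈ (tryPush maze n (v, s) kl).2, x ∈ (tryPush maze n (v, s) kl).1) ∧
    (∀ x ∈ (tryPush maze n (v, s) kl).1, x ∉ v → x ∈ (tryPush maze n (v, s) kl).2) ∧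
    ((tryPush maze n (v, s) kl).1.length + s.length
      = v.length + (tryPush maze n (v, s) kl).2.length) ∧
    (s.length ≤ (tryPush maze n (v, s) kl).2.length) := by
  unfold tryPush
  by_cases hc : kl.1 < n ∧ kl.2 < n ∧ ¬ kl ∈ v ∧ mazeAt maze kl.1 kl.2 = 0
  · obtain ⟨h1, h2, h3, h4⟩ := hc
    rw [if_pos ⟨h1, h2, h3, h4⟩]
    simp only [PySem.Set.add_of_not_mem h3]
    refine ⟨?_, ?_, ?_, ?_, ?_, ?_, ?_, ?_, ?_⟩
    · refine List.nodup_append.mpr ⟨hnd, List.nodup_singleton _, ?_⟩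
      intro x hx y hy
      cases List.mem_singleton.mp hy
      intro heq
      exact h3 (heq ▸ hx)
    · intro x hx; exact List.mem_append.mpr (Or.inl hx)
    · intro x hx
      rcases List.mem_append.mp hx with h | h
      · exact Or.inl h
      · exact Or.inr ⟨List.mem_singleton.mp h, h1, h2, h4⟩
    · intro _ _ _; exact List.mem_append.mpr (Or.inr (List.mem_singleton.mpr rfl))
    · intro x hx; exact List.mem_cons_of_mem _ hx
    · intro x hx
      rcases List.mem_cons.mp hx with h | h
      · subst h; exact List.mem_append.mpr (Or.inr (List.mem_singleton.mpr rfl))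
      · exact List.mem_append.mpr (Or.inl (hss x h))
    · intro x hx hxv
      rcases List.mem_append.mp hx with h | h
      · exact absurd h hxv
      · rw [List.mem_singleton.mp h]; exact List.mem_cons_self ..
    · simp only [List.length_append, List.length_cons, List.length_nil]; omega
    · simp
  · rw [if_neg hc]
    refine ⟨hnd, fun x hx => hx, fun x hx => Or.inl hx, ?_, fun x hx => hx, hss,
      fun x hx hxv => absurd hx hxv, rfl, le_refl _⟩
    intro h1 h2 h4
    by_cases hm : kl ∈ v
    · exact hm
    · exact absurd ⟨h1, h2, hm, h4⟩ hc

-- a visited set closed under open in-grid successors contains every reachable cell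
theorem closed_complete {maze : List (List Int)} {n : Int} (h0 : mazeAt maze 0 0 = 0)
    (v : List (Int × Int)) (h00 : ((0 : Int), (0 : Int)) ∈ v)
    (hcl : ∀ p ∈ v, ∀ q : Int × Int, (q = (p.1 + 1, p.2) ∨ q = (p.1, p.2 + 1)) →
      q.1 < n → q.2 < n → mazeAt maze q.1 q.2 = 0 → q ∈ v) :
    ∀ (m a b : Nat), a + b ≤ m → (↑a : Int) < n → (↑b : Int) < n →
      R maze a b = true → ((↑a : Int), (↑b : Int)) ∈ v := by
  intro m
  induction m with
  | zero =>
    intro a b hab ha hb hR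
    have h1 : a = 0 := by omega
    have h2 : b = 0 := by omega
    subst h1; subst h2
    simpa using h00
  | succ m ih =>
    intro a b hab ha hb hR
    by_cases hz : a = 0 ∧ b = 0
    · obtain ⟨rfl, rfl⟩ := hz; simpa using h00
    · have hopen : mazeAt maze (↑a) (↑b) = 0 := by
        by_contra hw
        rw [R_wall h0 a b hw] at hR
        exact absurd hR (by simp)
      rw [R_step a b hz hopen] at hR
      rcases Bool.or_eq_true_iff.mp hR with h | h
      · obtain ⟨hpos, hRp⟩ := Bool.and_eq_true_iff.mp h
        have hpos' : 0 < a := of_decide_eq_true hpos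
        obtain ⟨a', rfl⟩ : ∃ a', a = a' + 1 := ⟨a - 1, by omega⟩
        have hRp' : R maze a' b = true := by
          simpa using hRp
        have hmem := ih a' b (by omega) (by push_cast at ha ⊢; omega) hb hRp'
        have := hcl _ hmem ((↑(a' + 1) : Int), (↑b : Int))
          (Or.inl (by simp only; rw [Prod.mk.injEq]; constructor <;> push_cast <;> omega))
          ha hb hopen
        exact this
      · obtain ⟨hpos, hRp⟩ := Bool.and_eq_true_iff.mp h
        have hpos' : 0 < b := of_decide_eq_true hpos
        obtain ⟨b', rfl⟩ : ∃ b', b = b' + 1 := ⟨b - 1, by omega⟩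
        have hRp' : R maze a b' = true := by
          simpa using hRp
        have hmem := ih a b' (by omega) ha (by push_cast at hb ⊢; omega) hRp'
        have := hcl _ hmem ((↑a : Int), (↑(b' + 1) : Int))
          (Or.inr (by simp only; rw [Prod.mk.injEq]; constructor <;> push_cast <;> omega))
          ha hb hopen
        exact this

-- with an empty stack the invariant forces the target to be unreachable
theorem R_target_false_of_closed {maze : List (List Int)} {n : Int}
    (h0 : mazeAt maze 0 0 = 0) (hn : 1 ≤ n) (v : List (Int × Int))
    (hInv : InvB maze n v []) : R maze (n.toNat - 1) (n.toNat - 1) = false := by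
  obtain ⟨hnd, h00, hsv, hgrid, hcl⟩ := hInv
  by_contra h
  rw [Bool.not_eq_false] at h
  have hcast : ((↑(n.toNat - 1) : Int)) = n - 1 := by omega
  have hlt : ((↑(n.toNat - 1) : Int)) < n := by omega
  have hmem := closed_complete h0 v h00
    (fun p hp q => (hcl p hp (by simp)).2 q)
    ((n.toNat - 1) + (n.toNat - 1)) (n.toNat - 1) (n.toNat - 1) (le_refl _) hlt hlt h
  have hne := (hcl _ hmem (by simp)).1
  exact hne (by rw [Prod.mk.injEq]; exact ⟨hcast, hcast⟩)

-- the DFS loop computes reachability of the target corner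
theorem dfs_eq {maze : List (List Int)} {n : Int} (h0 : mazeAt maze 0 0 = 0)
    (hn : 1 ≤ n) :
    ∀ (fuel : Nat) (v s : List (Int × Int)), InvB maze n v s →
    s.length + 2 * (n.toNat * n.toNat - v.length) ≤ fuel →
    dfs maze n fuel v s = R maze (n.toNat - 1) (n.toNat - 1) := by
  intro fuel
  induction fuel with
  | zero =>
    intro v s hInv hfuel
    have hs : s = [] := List.length_eq_zero_iff.mp (by omega)
    subst hs
    simp only [dfs]
    exact (R_target_false_of_closed h0 hn v hInv).symm
  | succ f ih =>
    intro v s hInv hfuel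
    match s with
    | [] =>
      simp only [dfs]
      exact (R_target_false_of_closed h0 hn v hInv).symm
    | ij :: rest =>
      obtain ⟨hnd, h00, hsv, hgrid, hcl⟩ := hInv
      have hijv : ij ∈ v := hsv ij (List.mem_cons_self ..)
      have hrestv : ∀ x ∈ rest, x ∈ v := fun x hx => hsv x (List.mem_cons_of_mem _ hx)
      obtain ⟨hij1, hij2, hij3, hij4, hijR⟩ := hgrid ij hijv
      by_cases htgt : ij = (n - 1, n - 1)
      · -- target popped: both sides are true
        simp only [dfs, if_pos htgt]
        have e1 : ij.1.toNat = n.toNat - 1 := by rw [htgt]; simp only; omega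
        have e2 : ij.2.toNat = n.toNat - 1 := by rw [htgt]; simp only; omega
        rw [e1, e2] at hijR
        exact hijR.symm
      · simp only [dfs, if_neg htgt, List.foldl_cons, List.foldl_nil]
        -- the two candidate pushes
        obtain ⟨f1nd, f1vm, f1vb, f1cl, f1sm, f1sv, f1new, f1len, f1mono⟩ :=
          tryPush_facts maze n v rest (ij.1 + 1, ij.2) hnd hrestv
        set p1 := tryPush maze n (v, rest) (ij.1 + 1, ij.2) with hp1
        have hp1eta : (p1.1, p1.2) = p1 := rfl
        obtain ⟨f2nd, f2vm, f2vb, f2cl, f2sm, f2sv, f2new, f2len, f2mono⟩ :=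
          tryPush_facts maze n p1.1 p1.2 (ij.1, ij.2 + 1) f1nd f1sv
        rw [hp1eta] at f2nd f2vm f2vb f2cl f2sm f2sv f2new f2len f2mono
        set p2 := tryPush maze n p1 (ij.1, ij.2 + 1) with hp2
        -- grid/R facts for the two candidates
        have hdgrid : ∀ x ∈ p2.1,
            0 ≤ x.1 ∧ x.1 < n ∧ 0 ≤ x.2 ∧ x.2 < n ∧ R maze x.1.toNat x.2.toNat = true := by
          intro x hx
          rcases f2vb x hx with hx1 | ⟨hxe, hy1, hy2, hy3⟩
          · rcases f1vb x hx1 with hx0 | ⟨hxe, hy1, hy2, hy3⟩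
            · exact hgrid x hx0
            · subst hxe
              refine ⟨by omega, hy1, by omega, hy2, ?_⟩
              have e1 : ((ij.1 + 1, ij.2).1).toNat = ij.1.toNat + 1 := by omega
              have e2 : ((ij.1 + 1, ij.2).2).toNat = ij.2.toNat := rfl
              rw [e1, e2]
              refine R_succ_down _ _ ?_ hijR
              have ec : ((↑(ij.1.toNat + 1) : Int)) = ij.1 + 1 := by omega
              have ec2 : ((↑(ij.2.toNat) : Int)) = ij.2 := by omega
              rw [ec, ec2]; exact hy3
          · subst hxe
            refine ⟨by omega, hy1, by omega, hy2, ?_⟩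
            have e1 : ((ij.1, ij.2 + 1).1).toNat = ij.1.toNat := rfl
            have e2 : ((ij.1, ij.2 + 1).2).toNat = ij.2.toNat + 1 := by omega
            rw [e1, e2]
            refine R_succ_right _ _ ?_ hijR
            have ec : ((↑(ij.1.toNat) : Int)) = ij.1 := by omega
            have ec2 : ((↑(ij.2.toNat + 1) : Int)) = ij.2 + 1 := by omega
            rw [ec, ec2]; exact hy3
        have hInv2 : InvB maze n p2.1 p2.2 := by
          refine ⟨f2nd, f2vm _ (f1vm _ h00), f2sv, hdgrid, ?_⟩
          intro p hpv hps
          by_cases hpold : p ∈ v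
          · by_cases hpij : p = ij
            · subst hpij
              refine ⟨htgt, ?_⟩
              intro q hq hq1 hq2 hq0
              rcases hq with hq | hq
              · subst hq; exact f2vm _ (f1cl hq1 hq2 hq0)
              · subst hq; exact f2cl hq1 hq2 hq0
            · have hprest : p ∉ rest := fun hr => hps (f2sm _ (f1sm _ hr))
              have := hcl p hpold (by
                intro hmem
                rcases List.mem_cons.mp hmem with h | h
                · exact hpij h
                · exact hprest h)
              exact ⟨this.1, fun q hq hq1 hq2 hq0 => f2vm _ (f1vm _ (this.2 q hq hq1 hq2 hq0))⟩
          · exfalso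
            by_cases hp1m : p ∈ p1.1
            · exact hps (f2sm _ (f1new p hp1m hpold))
            · exact hps (f2new p hpv hp1m)
        have hlen2 : p2.1.length ≤ n.toNat * n.toNat :=
          length_le_grid p2.1 f2nd (fun p hp => ⟨(hdgrid p hp).1, (hdgrid p hp).2.1,
            (hdgrid p hp).2.2.1, (hdgrid p hp).2.2.2.1⟩)
        have hvlen : v.length ≤ p1.1.length := by omega
        have hfuel2 : p2.2.length + 2 * (n.toNat * n.toNat - p2.1.length) ≤ f := by
          simp only [List.length_cons] at hfuel
          omega
        exact ih p2.1 p2.2 hInv2 hfuel2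

theorem solB_eq (maze : List (List Int)) (n : Int) (hn : 1 ≤ n)
    (h0 : mazeAt maze 0 0 = 0) :
    solution_alt maze n = R maze (n.toNat - 1) (n.toNat - 1) := by
  unfold solution_alt
  rw [if_neg (by simp [h0])]
  have hv : PySem.Set.ofList [((0 : Int), (0 : Int))] = [((0 : Int), (0 : Int))] := by decide
  rw [hv]
  refine dfs_eq h0 hn _ _ _ ⟨by simp, by simp, by simp, ?_, ?_⟩ ?_
  · intro p hp
    rw [List.mem_singleton.mp hp]
    exact ⟨le_refl _, by omega, le_refl _, by omega, by simp [R]⟩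
  · intro p hp hps
    exact absurd (List.mem_singleton.mp hp ▸ List.mem_singleton.mpr rfl) hps
  · simp only [List.length_singleton]
    have hc : ((n.toNat : Int)) = n := by omega
    have hmul : (n * n).toNat = n.toNat * n.toNat := by
      conv_lhs => rw [← hc]
      rw [← Nat.cast_mul, Int.toNat_natCast]
    have h2 : 1 ≤ n.toNat * n.toNat :=
      Nat.one_le_iff_ne_zero.mpr (Nat.mul_ne_zero (by omega) (by omega))
    omega

-- B's loop on an empty stack returns False regardless of remaining fuel
theorem dfs_nil (maze : List (List Int)) (n : Int) (fuel : Nat)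
    (v : PySem.Set (Int × Int)) : dfs maze n fuel v [] = false := by
  cases fuel <;> simp [dfs]

-- ===== VERDICT (by name: the statement is the Claim_ definition above) =====
theorem solution_spec : Claim_equal_solution := by
  intro maze n _ _
  unfold Spec_solution
  by_cases h0 : mazeAt maze 0 0 = 0
  · by_cases hn : 1 ≤ n
    · rw [solA_eq maze n hn h0, solB_eq maze n hn h0]
    · -- n ≤ 0: A's loop is empty and B pushes nothing from (0,0); both are False
      unfold solution solution_alt
      rw [if_neg (by simp [h0]), if_neg (by simp [h0])]
      rw [PySem.List.pyRange_one_eq_nil (by omega), List.foldl_nil]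
      rw [show PySem.Set.ofList [((0 : Int), (0 : Int))] = [((0 : Int), (0 : Int))] from by decide]
      have hA : PySem.Set.contains [((0 : Int), (0 : Int))] ((n - 1 : Int), (n - 1 : Int)) = false := by
        rw [← Bool.not_eq_true, PySem.Set.contains_iff]
        simp only [List.mem_singleton, Prod.mk.injEq]
        omega
      rw [hA]
      -- one unfolding of B's loop: (0,0) is not the target and no neighbour is in-grid
      have hne : ¬ (((0 : Int), (0 : Int)) = ((n - 1 : Int), (n - 1 : Int))) := by
        rw [Prod.mk.injEq]; omega
      simp only [dfs, if_neg hne, List.foldl_cons, List.foldl_nil]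
      rw [show tryPush maze n ([((0 : Int), (0 : Int))], []) ((0 : Int) + 1, (0 : Int))
          = ([((0 : Int), (0 : Int))], []) from by
        unfold tryPush; rw [if_neg (by rintro ⟨h, -⟩; simp only at h; omega)]]
      rw [show tryPush maze n ([((0 : Int), (0 : Int))], []) ((0 : Int), (0 : Int) + 1)
          = ([((0 : Int), (0 : Int))], []) from by
        unfold tryPush; rw [if_neg (by rintro ⟨h, -⟩; simp only at h; omega)]]
      exact (dfs_nil maze n _ _).symm
  · unfold solution solution_alt
    rw [if_pos h0, if_pos h0]
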